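-- pv_equiv track=rewrite | github.com/shinwonse/coding-test | 프로그래머스/unrated/133502. 햄버거 만들기/햄버거 만들기.py | solution
-- ===== SOURCE A (Python) =====
-- def solution(ingredient):
--     answer = 0
--     stack = []
--     hamburger = [1, 2, 3, 1]
--
--     for i in ingredient:
--         stack.append(i)
--
--         if stack[-4:] == hamburger:
--             answer += 1
--             for i in range(4):
--                 stack.pop()
--
--     return answer
-- ===== SOURCE B (Python) =====
-- def solution(ingredient):
--     lst = list(ingredient)
--     answer = 0
--     while True:
--         found = None
--         for i in range(len(lst) - 3):
--             if lst[i:i+4] == [1, 2, 3, 1]: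
--                 found = i
--                 break
--         if found is None:
--             return answer
--         del lst[found:found+4]
--         answer += 1
-- ===== Notes on version B (the rewrite author's own statement) =====
-- stated objective: alternative
-- what changed: Replaces the one-pass stack with repeated rewriting: scan a list copy for the first occurrence of [1,2,3,1], delete it, increment the counter, and restart until no occurrence remains; correctness rests on the proved fact that this leftmost-deletion count equals the stack count.
import Mathlib
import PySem

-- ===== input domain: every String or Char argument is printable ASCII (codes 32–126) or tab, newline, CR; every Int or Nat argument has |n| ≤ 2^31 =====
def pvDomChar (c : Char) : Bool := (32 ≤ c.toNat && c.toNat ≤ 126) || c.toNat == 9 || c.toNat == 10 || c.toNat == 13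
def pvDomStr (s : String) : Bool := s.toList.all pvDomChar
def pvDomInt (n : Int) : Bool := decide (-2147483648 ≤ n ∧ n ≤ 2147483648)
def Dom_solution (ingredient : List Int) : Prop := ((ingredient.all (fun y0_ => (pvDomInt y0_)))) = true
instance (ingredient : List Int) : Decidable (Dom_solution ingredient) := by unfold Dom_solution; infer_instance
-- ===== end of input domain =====

-- B replaces A's one-pass stack with repeated leftmost-occurrence deletion on a list copy
-- (an alternative strategy of similar size; not faster). Return values only; neither mutates its argument.

-- ===== PORT A =====
-- the hamburger pattern (Python A's local `hamburger`)
def hamb : List Int := [1, 2, 3, 1]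

-- body of A's for-loop: push i onto the stack; if stack[-4:] == hamburger, answer += 1 and pop
-- four times (list.pop() here always acts on a list of length ≥ 1, removing the last element:
-- dropLast is exact)
def stepA (sa : List Int × Int) (i : Int) : List Int × Int :=
  if PySem.List.slice (sa.1 ++ [i]) (some (-4)) none = hamb then
    ((PySem.List.pyRange 0 4 1).foldl (fun s _ => s.dropLast) (sa.1 ++ [i]), sa.2 + 1)
  else (sa.1 ++ [i], sa.2)

def solution (ingredient : List Int) : Int :=
  (ingredient.foldl stepA ([], 0)).2

-- ===== PORT B =====
-- B's inner scan + deletion: find the first index i with lst[i:i+4] == [1,2,3,1] and return the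
-- list with that window deleted (del lst[i:i+4]); none when no window matches
def removeFirst : List Int → Option (List Int)
  | x1 :: x2 :: x3 :: x4 :: rest =>
      if x1 = 1 ∧ x2 = 2 ∧ x3 = 3 ∧ x4 = 1 then some rest
      else (removeFirst (x2 :: x3 :: x4 :: rest)).map (x1 :: ·)
  | _ => none

-- B's while-loop: keep deleting the leftmost window and counting until none remains
-- (each deletion removes four elements, so the loop runs at most `length` times: the fuel
-- parameter only makes that totality structural and is never exhausted while work remains)
def altGo : Nat → List Int → Int → Int
  | 0, _, answer => answer
  | fuel + 1, l, answer =>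
    match removeFirst l with
    | none => answer
    | some l' => altGo fuel l' (answer + 1)

def solution_alt (ingredient : List Int) : Int :=
  altGo ingredient.length ingredient 0

-- ===== PRECONDITION & SPEC =====
def Spec_solution (ingredient : List Int) (out : Int) : Prop := out = solution_alt ingredient
instance (ingredient : List Int) (out : Int) : Decidable (Spec_solution ingredient out) := by unfold Spec_solution; infer_instance

-- ===== CLAIM (what is proved, stated in full; the proofs are below) =====
def Claim_equal_solution : Prop := ∀ (ingredient : List Int), Dom_solution ingredient → Spec_solution ingredient (solution ingredient)

-- ===== LEMMAS AND PROOFS =====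

-- "the only occurrence of the pattern in u ++ hamb is the final one"
def noEarly (u : List Int) : Prop := ∀ w z : List Int, u ++ hamb = w ++ hamb ++ z → z = []

theorem ends_iff (st : List Int) :
    (PySem.List.slice st (some (-4)) none = hamb) ↔ ∃ w, st = w ++ hamb := by
  rw [PySem.List.slice_from_neg_ofNat st 4 (by omega)]
  constructor
  · intro h
    refine ⟨st.take (st.length - 4), ?_⟩
    conv_lhs => rw [← List.take_append_drop (st.length - 4) st]
    rw [h]
  · rintro ⟨w, rfl⟩
    have hl : (w ++ hamb).length - 4 = w.length := by simp [hamb]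
    rw [hl, List.drop_left]

theorem stepA_nomatch (s : List Int) (a : Int) (i : Int)
    (h : ¬ ∃ w, s ++ [i] = w ++ hamb) : stepA (s, a) i = (s ++ [i], a) := by
  unfold stepA
  rw [if_neg]
  intro hc; exact h ((ends_iff _).1 hc)

theorem pops_eq (x : List Int) :
    (PySem.List.pyRange 0 4 1).foldl (fun s _ => s.dropLast) x =
      x.dropLast.dropLast.dropLast.dropLast := by
  have hr : PySem.List.pyRange 0 4 1 = [0, 1, 2, 3] := by decide
  rw [hr]; rfl

theorem dropLast4_append (w : List Int) :
    (w ++ hamb).dropLast.dropLast.dropLast.dropLast = w := by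
  simp [hamb]

theorem stepA_match (w s : List Int) (a : Int) (i : Int)
    (e : s ++ [i] = w ++ hamb) : stepA (s, a) i = (w, a + 1) := by
  unfold stepA
  rw [if_pos ((ends_iff _).2 ⟨w, e⟩)]
  rw [pops_eq, e, dropLast4_append]

theorem foldl_noOcc (u : List Int) (a : Int)
    (h : ¬ ∃ w v, u = w ++ hamb ++ v) : u.foldl stepA ([], a) = (u, a) := by
  induction u using List.reverseRecOn with
  | nil => simp
  | append_singleton w x ih =>
    rw [List.foldl_append]
    rw [ih (by rintro ⟨p, q, rfl⟩; exact h ⟨p, q ++ [x], by simp⟩)]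
    simpa using stepA_nomatch w a x (by rintro ⟨p, e⟩; exact h ⟨p, [], by simp [e]⟩)

theorem noEarly_noOcc (u : List Int) (h : noEarly u) : ¬ ∃ w v, u = w ++ hamb ++ v := by
  rintro ⟨w, v, rfl⟩
  have := h w (v ++ hamb) (by simp)
  simp [hamb] at this

theorem matchRun (u : List Int) (a : Int) (h : noEarly u) :
    hamb.foldl stepA (u, a) = (u, a + 1) := by
  have s1 : stepA (u, a) 1 = (u ++ [1], a) := by
    apply stepA_nomatch
    rintro ⟨w, e⟩
    have hu : u = w ++ [1, 2, 3] := by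
      have := congrArg List.dropLast e
      simpa [hamb] using this
    have := h w [2, 3, 1] (by rw [hu]; simp [hamb])
    simp at this
  have s2 : stepA (u ++ [1], a) 2 = (u ++ [1, 2], a) := by
    have := stepA_nomatch (u ++ [1]) a 2 ?_
    · simpa using this
    rintro ⟨w, e⟩
    have := congrArg List.getLast? e
    simp [hamb] at this
  have s3 : stepA (u ++ [1, 2], a) 3 = (u ++ [1, 2, 3], a) := by
    have := stepA_nomatch (u ++ [1, 2]) a 3 ?_
    · simpa using this
    rintro ⟨w, e⟩
    have := congrArg List.getLast? e
    simp [hamb] at this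
  have s4 : stepA (u ++ [1, 2, 3], a) 1 = (u, a + 1) :=
    stepA_match u (u ++ [1, 2, 3]) a 1 (by simp [hamb])
  show List.foldl stepA (u, a) hamb = (u, a + 1)
  simp only [hamb, List.foldl, s1, s2, s3]
  exact s4

theorem removeFirst_none : ∀ (l : List Int), removeFirst l = none →
    ¬ ∃ u v, l = u ++ hamb ++ v := by
  intro l
  induction l with
  | nil => rintro - ⟨u, v, e⟩; have := congrArg List.length e; simp [hamb] at this
  | cons x1 xs ih =>
    match xs with
    | [] => rintro - ⟨u, v, e⟩; have := congrArg List.length e; simp [hamb] at this; omega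
    | [a] => rintro - ⟨u, v, e⟩; have := congrArg List.length e; simp [hamb] at this; omega
    | [a, b] => rintro - ⟨u, v, e⟩; have := congrArg List.length e; simp [hamb] at this; omega
    | x2 :: x3 :: x4 :: rest =>
      intro h
      unfold removeFirst at h
      split at h
      · simp at h
      · rename_i hcond
        rintro ⟨u, v, e⟩
        match u with
        | [] =>
          simp [hamb] at e
          exact hcond ⟨e.1, e.2.1, e.2.2.1, e.2.2.2.1⟩
        | y :: u' =>
          have ht : removeFirst (x2 :: x3 :: x4 :: rest) = none := by
            cases hrm : removeFirst (x2 :: x3 :: x4 :: rest) with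
            | none => rfl
            | some t => rw [hrm] at h; simp at h
          have e' : x2 :: x3 :: x4 :: rest = u' ++ hamb ++ v := by
            have := e; simp [hamb] at this ⊢
            exact this.2
          exact ih ht ⟨u', v, e'⟩

theorem removeFirst_some : ∀ (l l' : List Int), removeFirst l = some l' →
    ∃ u v, l = u ++ hamb ++ v ∧ l' = u ++ v ∧ noEarly u := by
  intro l
  induction l with
  | nil => intro l' h; simp [removeFirst] at h
  | cons x1 xs ih =>
    match xs with
    | [] => intro l' h; simp [removeFirst] at h
    | [a] => intro l' h; simp [removeFirst] at h
    | [a, b] => intro l' h; simp [removeFirst] at h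
    | x2 :: x3 :: x4 :: rest =>
      intro l' h
      unfold removeFirst at h
      split at h
      · rename_i hcond
        obtain ⟨h1, h2, h3, h4⟩ := hcond
        cases h
        refine ⟨[], rest, by simp [hamb, h1, h2, h3, h4], by simp, ?_⟩
        intro w z e
        have := congrArg List.length e
        simp [hamb] at this
        have hz : z.length = 0 := by omega
        exact List.eq_nil_of_length_eq_zero hz
      · rename_i hcond
        cases ht : removeFirst (x2 :: x3 :: x4 :: rest) with
        | none => rw [ht] at h; simp at h
        | some t =>
          rw [ht] at h; simp at h
          obtain ⟨u₀, v, heq, hteq, hne⟩ := ih t ht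
          refine ⟨x1 :: u₀, v, by simp [heq], by simp [← h, hteq], ?_⟩
          intro w z e
          match w with
          | [] =>
            -- then x1 :: u₀ ++ hamb starts with hamb, contradicting the failed window test
            exfalso
            simp [hamb] at e
            obtain ⟨e1, e2⟩ := e
            have e3 : x2 :: x3 :: x4 :: rest = 2 :: 3 :: 1 :: (z ++ v) := by
              rw [heq]
              have := congrArg (· ++ v) e2
              simpa [hamb] using this
            obtain ⟨f1, f2, f3, -⟩ : x2 = 2 ∧ x3 = 3 ∧ x4 = 1 ∧ rest = z ++ v := by
              simpa using e3
            exact hcond ⟨e1, f1, f2, f3⟩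
          | y :: w' =>
            injection e with h1 h2
            exact hne w' z (by simpa [List.append_assoc] using h2)

theorem main_eq : ∀ (n : Nat) (l : List Int), l.length ≤ n → ∀ a : Int,
    (l.foldl stepA ([], a)).2 = altGo n l a := by
  intro n
  induction n with
  | zero =>
    intro l hl a
    have : l = [] := by cases l with | nil => rfl | cons x xs => simp at hl
    subst this
    simp [altGo]
  | succ n ih =>
    intro l hl a
    cases h : removeFirst l with
    | none =>
      rw [foldl_noOcc l a (removeFirst_none l h)]
      simp [altGo, h]
    | some l' =>
      obtain ⟨u, v, rfl, rfl, hne⟩ := removeFirst_some l l' h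
      have hstep : altGo (n + 1) (u ++ hamb ++ v) a = altGo n (u ++ v) (a + 1) := by
        simp only [altGo, h]
      rw [hstep]
      have hlen : (u ++ v).length ≤ n := by
        simp [hamb] at hl ⊢
        omega
      rw [← ih (u ++ v) hlen (a + 1)]
      rw [List.append_assoc, List.foldl_append, List.foldl_append,
          foldl_noOcc u a (noEarly_noOcc u hne), matchRun u a hne,
          List.foldl_append, foldl_noOcc u (a + 1) (noEarly_noOcc u hne)]

-- ===== VERDICT (by name: the statement is the Claim_ definition above) =====
theorem solution_spec : Claim_equal_solution := by
  intro l _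
  show solution l = solution_alt l
  unfold solution solution_alt
  exact main_eq l.length l le_rfl 0
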